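-- pv_equiv track=rewrite | github.com/5206324/TM12005-Case-3 | Stap4_Regulariteit_analyse.py | analyseer_episodes
-- ===== SOURCE A (Python) =====
-- def analyseer_episodes(status_lijst):
--     pacs = 0
--     af_runs = 0
--     in_af_run = False
--
--     # We tellen hoe vaak de status verspringt
--     for s in status_lijst:
--         if s == 1: # Losse PAC
--             pacs += 1
--         elif s == 2: # AF
--             if not in_af_run:
--                 af_runs += 1
--                 in_af_run = True
--         else: # Normaal
--             in_af_run = False
--
--     return pacs, af_runs
-- ===== SOURCE B (Python) =====
-- def analyseer_episodes(status_lijst):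
--     lst = list(status_lijst)
--     f = [s for s in lst if s != 1]
--     af_runs = sum(1 for prev, cur in zip([None] + f, f) if cur == 2 and prev != 2)
--     return lst.count(1), af_runs
-- ===== Notes on version B (the rewrite author's own statement) =====
-- stated objective: alternative
-- what changed: Replaced the single stateful scan with an in_af_run flag by two stateless passes: pacs = lst.count(1), and af_runs counted as rising edges into status 2 via a pairwise zip over the list with PACs filtered out.
import Mathlib
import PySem

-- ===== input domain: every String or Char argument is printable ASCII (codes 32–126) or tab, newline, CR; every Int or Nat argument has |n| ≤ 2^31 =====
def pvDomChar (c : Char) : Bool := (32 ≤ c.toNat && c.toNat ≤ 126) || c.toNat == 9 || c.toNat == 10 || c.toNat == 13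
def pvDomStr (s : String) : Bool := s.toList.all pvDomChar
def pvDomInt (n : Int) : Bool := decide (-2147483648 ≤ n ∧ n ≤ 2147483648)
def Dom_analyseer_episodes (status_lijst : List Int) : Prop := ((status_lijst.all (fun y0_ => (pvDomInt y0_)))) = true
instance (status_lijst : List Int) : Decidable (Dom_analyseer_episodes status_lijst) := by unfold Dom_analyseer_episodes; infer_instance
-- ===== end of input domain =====

-- B replaces A's single stateful scan (in_af_run flag) by stateless passes: count of 1s, and rising edges into 2 over the 1-filtered list (alternative decomposition, same cost).

-- ===== PORT A =====
-- the for-loop over status_lijst with state (pacs, af_runs, in_af_run)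
def analyseer_episodes_loop (l : List Int) (pacs af_runs : Int) (in_af_run : Bool) : Int × Int :=
  match l with
  | [] => (pacs, af_runs)
  | s :: rest =>
    if s = 1 then analyseer_episodes_loop rest (pacs + 1) af_runs in_af_run
    else if s = 2 then
      if ¬ in_af_run then analyseer_episodes_loop rest pacs (af_runs + 1) true
      else analyseer_episodes_loop rest pacs af_runs in_af_run
    else analyseer_episodes_loop rest pacs af_runs false

def analyseer_episodes (status_lijst : List Int) : Int × Int :=
  analyseer_episodes_loop status_lijst 0 0 false

-- ===== PORT B =====
def analyseer_episodes_alt (status_lijst : List Int) : Int × Int :=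
  let f := status_lijst.filter (fun s => s ≠ 1)
  let af_runs : Int :=
    ((List.zip ((none : Option Int) :: f.map some) f).countP
      (fun pc => pc.2 == 2 && pc.1 != some 2) : Nat)
  (PySem.List.count status_lijst 1, af_runs)

-- ===== PRECONDITION & SPEC =====
def Spec_analyseer_episodes (status_lijst : List Int) (out : Int × Int) : Prop := out = analyseer_episodes_alt status_lijst
instance (status_lijst : List Int) (out : Int × Int) : Decidable (Spec_analyseer_episodes status_lijst out) := by unfold Spec_analyseer_episodes; infer_instance

-- ===== CLAIM (what is proved, stated in full; the proofs are below) =====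
def Claim_equal_analyseer_episodes : Prop := ∀ (status_lijst : List Int), Dom_analyseer_episodes status_lijst → Spec_analyseer_episodes status_lijst (analyseer_episodes status_lijst)

-- ===== LEMMAS AND PROOFS =====

-- rising-edge count with a running "previous element" (recursion form of B's zip comprehension)
def edges (prev : Option Int) (f : List Int) : Nat :=
  match f with
  | [] => 0
  | c :: rest => (if c = 2 ∧ prev ≠ some 2 then 1 else 0) + edges (some c) rest

theorem countP_zip_eq_edges (f : List Int) (p : Option Int) :
    (List.zip (p :: f.map some) f).countP (fun pc => pc.2 == 2 && pc.1 != some 2)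
      = edges p f := by
  induction f generalizing p with
  | nil => rfl
  | cons c rest ih =>
    rw [List.map_cons, List.zip_cons_cons, List.countP_cons, ih]
    simp only [edges]
    by_cases h2 : c = 2 <;> by_cases hp : p = some 2 <;> simp [h2, hp] <;> omega

theorem edges_congr (f : List Int) (p q : Option Int) (hp : p ≠ some 2) (hq : q ≠ some 2) :
    edges p f = edges q f := by
  cases f with
  | nil => rfl
  | cons c rest => simp [edges, hp, hq]

theorem loop_eq (l : List Int) (pacs af_runs : Int) (in_af_run : Bool) :
    analyseer_episodes_loop l pacs af_runs in_af_run
      = (pacs + PySem.List.count l 1,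
         af_runs + edges (if in_af_run then some 2 else none) (l.filter (fun s => s ≠ 1))) := by
  induction l generalizing pacs af_runs in_af_run with
  | nil => simp [analyseer_episodes_loop, PySem.List.count]
  | cons s rest ih =>
    by_cases h1 : s = 1
    · simp only [analyseer_episodes_loop, h1, if_pos rfl, ih]
      simp [PySem.List.count, List.count_cons]
      ring
    · by_cases h2 : s = 2
      · cases in_af_run with
        | true =>
          simp only [analyseer_episodes_loop, h2, h1, if_neg h1, ih]
          simp [PySem.List.count, List.count_cons, h1, h2, edges]
        | false =>
          simp only [analyseer_episodes_loop, h2, h1, if_neg h1, ih]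
          simp [PySem.List.count, List.count_cons, h1, h2, edges]
          ring
      · simp only [analyseer_episodes_loop, if_neg h1, if_neg h2, ih]
        simp [PySem.List.count, List.count_cons, h1, h2, edges]
        cases in_af_run with
        | false => exact edges_congr _ none (some s) (by simp) (by simp [h2])
        | true => exact edges_congr _ none (some s) (by simp) (by simp [h2])

-- ===== VERDICT (by name: the statement is the Claim_ definition above) =====
theorem analyseer_episodes_spec : Claim_equal_analyseer_episodes := by
  intro l _
  unfold Spec_analyseer_episodes analyseer_episodes analyseer_episodes_alt
  rw [loop_eq]
  simp [countP_zip_eq_edges]
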